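-- pv_equiv track=rewrite | github.com/TheEphesian/coterie | src/utils/data_loader.py | _extract_grapevine_traits
-- ===== SOURCE A (Python) =====
-- from typing import Dict, List, Any, Optional, Union, Tuple
--
-- def _extract_grapevine_traits(raw_data: Dict) -> Dict:
--     """Extract traits from raw Grapevine data.
--
--     Args:
--         raw_data: Raw Grapevine data
--
--     Returns:
--         Dictionary of traits categorized by type
--     """
--     traits = {
--         'physical': {},
--         'social': {},
--         'mental': {},
--         'talents': {},
--         'skills': {},
--         'knowledges': {},
--         'disciplines': {},
--         'backgrounds': {},
--         'virtues': {},
--         'merits': {},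
--         'flaws': {}
--     }
--
--     # Extract physical attributes
--     if 'Physical' in raw_data:
--         for key, value in raw_data['Physical'].items():
--             if value and value.isdigit():
--                 traits['physical'][key] = int(value)
--
--     # Extract social attributes
--     if 'Social' in raw_data:
--         for key, value in raw_data['Social'].items():
--             if value and value.isdigit():
--                 traits['social'][key] = int(value)
--
--     # Extract mental attributes
--     if 'Mental' in raw_data:
--         for key, value in raw_data['Mental'].items():
--             if value and value.isdigit():
--                 traits['mental'][key] = int(value)
--
--     # Extract abilities
--     if 'Abilities' in raw_data:
--         abilities = raw_data['Abilities']
--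
--         # Talents
--         for key in ['Alertness', 'Athletics', 'Brawl', 'Dodge', 'Empathy',
--                     'Expression', 'Intimidation', 'Leadership', 'Streetwise', 'Subterfuge']:
--             if key in abilities and abilities[key] and abilities[key].isdigit():
--                 traits['talents'][key] = int(abilities[key])
--
--         # Skills
--         for key in ['Animal Ken', 'Crafts', 'Drive', 'Etiquette', 'Firearms', 'Melee',
--                    'Performance', 'Security', 'Stealth', 'Survival']:
--             if key in abilities and abilities[key] and abilities[key].isdigit():
--                 traits['skills'][key] = int(abilities[key])
--
--         # Knowledges
--         for key in ['Academics', 'Computer', 'Finance', 'Investigation', 'Law', 'Linguistics',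
--                    'Medicine', 'Occult', 'Politics', 'Science']:
--             if key in abilities and abilities[key] and abilities[key].isdigit():
--                 traits['knowledges'][key] = int(abilities[key])
--
--     # Extract backgrounds
--     if 'Backgrounds' in raw_data:
--         for key, value in raw_data['Backgrounds'].items():
--             if value and value.isdigit():
--                 traits['backgrounds'][key] = int(value)
--
--     # Extract disciplines
--     if 'Disciplines' in raw_data:
--         for key, value in raw_data['Disciplines'].items():
--             if value and value.isdigit():
--                 traits['disciplines'][key] = int(value)
--
--     # Extract virtues
--     if 'Virtues' in raw_data:
--         for key, value in raw_data['Virtues'].items():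
--             if value and value.isdigit():
--                 traits['virtues'][key] = int(value)
--
--     # Extract merits/flaws
--     if 'Merits' in raw_data:
--         for key, value in raw_data['Merits'].items():
--             if value:
--                 # Merits/flaws might have descriptions instead of values
--                 traits['merits'][key] = value
--
--     if 'Flaws' in raw_data:
--         for key, value in raw_data['Flaws'].items():
--             if value:
--                 traits['flaws'][key] = value
--
--     return traits
-- ===== SOURCE B (Python) =====
-- TALENTS = ['Alertness', 'Athletics', 'Brawl', 'Dodge', 'Empathy',
--            'Expression', 'Intimidation', 'Leadership', 'Streetwise', 'Subterfuge']
-- SKILLS = ['Animal Ken', 'Crafts', 'Drive', 'Etiquette', 'Firearms', 'Melee',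
--           'Performance', 'Security', 'Stealth', 'Survival']
-- KNOWLEDGES = ['Academics', 'Computer', 'Finance', 'Investigation', 'Law', 'Linguistics',
--               'Medicine', 'Occult', 'Politics', 'Science']
--
-- # output categories in order; True = numeric (digit-filtered, int-converted), False = raw copy
-- CATEGORIES = [('physical', True), ('social', True), ('mental', True),
--               ('talents', True), ('skills', True), ('knowledges', True),
--               ('disciplines', True), ('backgrounds', True), ('virtues', True),
--               ('merits', False), ('flaws', False)]
--
--
-- def _extract_grapevine_traits(raw_data):
--     # Stage 1: flatten everything relevant into one tagged (category, key, value) stream.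
--     stream = []
--     for src, cat in (('Physical', 'physical'), ('Social', 'social'), ('Mental', 'mental'),
--                      ('Backgrounds', 'backgrounds'), ('Disciplines', 'disciplines'),
--                      ('Virtues', 'virtues'), ('Merits', 'merits'), ('Flaws', 'flaws')):
--         for k, v in raw_data.get(src, {}).items():
--             stream.append((cat, k, v))
--     abilities = raw_data.get('Abilities', {})
--     for cat, keys in (('talents', TALENTS), ('skills', SKILLS), ('knowledges', KNOWLEDGES)):
--         for k in keys:
--             if k in abilities:
--                 stream.append((cat, k, abilities[k]))
--     # Stage 2: for each output category, select its entries from the stream and convert.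
--     result = {}
--     for cat, numeric in CATEGORIES:
--         if numeric:
--             result[cat] = {k: int(v) for c, k, v in stream
--                            if c == cat and v and v.isdigit()}
--         else:
--             result[cat] = {k: v for c, k, v in stream if c == cat and v}
--     return result
-- ===== Notes on version B (the rewrite author's own statement) =====
-- stated objective: alternative
-- what changed: Replaces A's eleven section-specific mutate-in-place loops by a two-stage pipeline: first flatten all relevant sections (and the fixed ability key lists) into one tagged (category, key, value) stream, then build each output category by selecting and converting its entries from that stream.
import Mathlib
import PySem

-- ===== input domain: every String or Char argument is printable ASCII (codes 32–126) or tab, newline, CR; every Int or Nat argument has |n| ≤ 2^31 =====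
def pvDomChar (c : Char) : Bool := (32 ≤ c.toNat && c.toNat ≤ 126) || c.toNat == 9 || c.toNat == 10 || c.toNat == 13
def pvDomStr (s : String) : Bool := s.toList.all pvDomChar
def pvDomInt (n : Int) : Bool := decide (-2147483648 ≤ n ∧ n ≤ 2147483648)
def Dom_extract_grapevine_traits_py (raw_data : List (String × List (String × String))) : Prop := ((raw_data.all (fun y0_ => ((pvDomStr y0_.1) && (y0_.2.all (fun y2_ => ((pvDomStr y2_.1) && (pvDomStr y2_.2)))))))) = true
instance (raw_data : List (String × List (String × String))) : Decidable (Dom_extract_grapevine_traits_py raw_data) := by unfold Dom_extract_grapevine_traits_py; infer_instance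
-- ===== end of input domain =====

-- B replaces A's eleven section-specific mutate-in-place loop blocks by a two-stage
-- pipeline: flatten everything into one tagged (category, key, value) stream, then
-- build each output category by selecting from that stream (objective: alternative).

-- ===== PORT A =====
-- int(v) rendered back as its decimal string (the output type carries str values);
-- v.isdigit() guarantees the parse succeeds.
def pvIntStr (v : String) : String := PySem.Int.toStr ((PySem.Int.ofStr? v).getD 0)

def extract_grapevine_traits_py (raw_data : List (String × List (String × String))) : List (String × List (String × String)) :=
  let d := PySem.Dict.ofList raw_data
  -- if 'Physical' in raw_data: for key, value in … .items(): if value and value.isdigit(): …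
  let physical := match d.get? "Physical" with
    | none => []
    | some sec => (PySem.Dict.ofList sec).items.foldl
        (fun acc kv => if kv.2 != "" && PySem.Str.strIsdigit kv.2 then acc ++ [(kv.1, pvIntStr kv.2)] else acc) []
  let social := match d.get? "Social" with
    | none => []
    | some sec => (PySem.Dict.ofList sec).items.foldl
        (fun acc kv => if kv.2 != "" && PySem.Str.strIsdigit kv.2 then acc ++ [(kv.1, pvIntStr kv.2)] else acc) []
  let mental := match d.get? "Mental" with
    | none => []
    | some sec => (PySem.Dict.ofList sec).items.foldl
        (fun acc kv => if kv.2 != "" && PySem.Str.strIsdigit kv.2 then acc ++ [(kv.1, pvIntStr kv.2)] else acc) []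
  -- if 'Abilities' in raw_data: three loops over fixed key lists, 'key in abilities and abilities[key] and abilities[key].isdigit()'
  let abil3 := match d.get? "Abilities" with
    | none => (([] : List (String × String)), ([] : List (String × String)), ([] : List (String × String)))
    | some ab' =>
      let ab := PySem.Dict.ofList ab'
      let talents := ["Alertness", "Athletics", "Brawl", "Dodge", "Empathy",
                      "Expression", "Intimidation", "Leadership", "Streetwise", "Subterfuge"].foldl
        (fun acc k => if ab.contains k && ab.getD k "" != "" && PySem.Str.strIsdigit (ab.getD k "") then acc ++ [(k, pvIntStr (ab.getD k ""))] else acc) []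
      let skills := ["Animal Ken", "Crafts", "Drive", "Etiquette", "Firearms", "Melee",
                     "Performance", "Security", "Stealth", "Survival"].foldl
        (fun acc k => if ab.contains k && ab.getD k "" != "" && PySem.Str.strIsdigit (ab.getD k "") then acc ++ [(k, pvIntStr (ab.getD k ""))] else acc) []
      let knowledges := ["Academics", "Computer", "Finance", "Investigation", "Law", "Linguistics",
                         "Medicine", "Occult", "Politics", "Science"].foldl
        (fun acc k => if ab.contains k && ab.getD k "" != "" && PySem.Str.strIsdigit (ab.getD k "") then acc ++ [(k, pvIntStr (ab.getD k ""))] else acc) []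
      (talents, skills, knowledges)
  let backgrounds := match d.get? "Backgrounds" with
    | none => []
    | some sec => (PySem.Dict.ofList sec).items.foldl
        (fun acc kv => if kv.2 != "" && PySem.Str.strIsdigit kv.2 then acc ++ [(kv.1, pvIntStr kv.2)] else acc) []
  let disciplines := match d.get? "Disciplines" with
    | none => []
    | some sec => (PySem.Dict.ofList sec).items.foldl
        (fun acc kv => if kv.2 != "" && PySem.Str.strIsdigit kv.2 then acc ++ [(kv.1, pvIntStr kv.2)] else acc) []
  let virtues := match d.get? "Virtues" with
    | none => []
    | some sec => (PySem.Dict.ofList sec).items.foldl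
        (fun acc kv => if kv.2 != "" && PySem.Str.strIsdigit kv.2 then acc ++ [(kv.1, pvIntStr kv.2)] else acc) []
  let merits := match d.get? "Merits" with
    | none => []
    | some sec => (PySem.Dict.ofList sec).items.foldl
        (fun acc kv => if kv.2 != "" then acc ++ [kv] else acc) []
  let flaws := match d.get? "Flaws" with
    | none => []
    | some sec => (PySem.Dict.ofList sec).items.foldl
        (fun acc kv => if kv.2 != "" then acc ++ [kv] else acc) []
  [("physical", physical), ("social", social), ("mental", mental),
   ("talents", abil3.1), ("skills", abil3.2.1), ("knowledges", abil3.2.2),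
   ("disciplines", disciplines), ("backgrounds", backgrounds), ("virtues", virtues),
   ("merits", merits), ("flaws", flaws)]

-- ===== PORT B =====
def pvTalents : List String := ["Alertness", "Athletics", "Brawl", "Dodge", "Empathy",
  "Expression", "Intimidation", "Leadership", "Streetwise", "Subterfuge"]
def pvSkills : List String := ["Animal Ken", "Crafts", "Drive", "Etiquette", "Firearms", "Melee",
  "Performance", "Security", "Stealth", "Survival"]
def pvKnowledges : List String := ["Academics", "Computer", "Finance", "Investigation", "Law", "Linguistics",
  "Medicine", "Occult", "Politics", "Science"]

-- CATEGORIES: output categories in order; true = numeric, false = raw copy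
def pvCategories : List (String × Bool) :=
  [("physical", true), ("social", true), ("mental", true),
   ("talents", true), ("skills", true), ("knowledges", true),
   ("disciplines", true), ("backgrounds", true), ("virtues", true),
   ("merits", false), ("flaws", false)]

-- the (source_section, category) pairs of B's stage-1 flattening loop
def pvSectionTags : List (String × String) :=
  [("Physical", "physical"), ("Social", "social"), ("Mental", "mental"),
   ("Backgrounds", "backgrounds"), ("Disciplines", "disciplines"),
   ("Virtues", "virtues"), ("Merits", "merits"), ("Flaws", "flaws")]

def pvAbilCats : List (String × List String) :=
  [("talents", pvTalents), ("skills", pvSkills), ("knowledges", pvKnowledges)]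

def extract_grapevine_traits_py_alt (raw_data : List (String × List (String × String))) : List (String × List (String × String)) :=
  let d := PySem.Dict.ofList raw_data
  -- Stage 1: flatten into one tagged (category, key, value) stream
  let stream1 := pvSectionTags.foldl (fun st sc =>
      (PySem.Dict.ofList (d.getD sc.1 [])).items.foldl
        (fun st2 kv => st2 ++ [(sc.2, kv.1, kv.2)]) st) []
  let ab := PySem.Dict.ofList (d.getD "Abilities" [])
  let stream := pvAbilCats.foldl (fun st ck =>
      ck.2.foldl (fun st2 k => if ab.contains k then st2 ++ [(ck.1, k, ab.getD k "")] else st2) st) stream1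
  -- Stage 2: per output category, select its entries from the stream (dict comprehensions)
  (pvCategories.foldl (fun res cn =>
      res.insert cn.1 (if cn.2 then
          (PySem.Dict.ofList ((stream.filter
              (fun t => t.1 == cn.1 && t.2.2 != "" && PySem.Str.strIsdigit t.2.2)).map
              (fun t => (t.2.1, pvIntStr t.2.2)))).items
        else
          (PySem.Dict.ofList ((stream.filter
              (fun t => t.1 == cn.1 && t.2.2 != "")).map
              (fun t => (t.2.1, t.2.2)))).items))
    PySem.Dict.empty).items

-- ===== PRECONDITION & SPEC =====
def Spec_extract_grapevine_traits_py (raw_data : List (String × List (String × String))) (out : List (String × List (String × String))) : Prop := out = extract_grapevine_traits_py_alt raw_data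
instance (raw_data : List (String × List (String × String))) (out : List (String × List (String × String))) : Decidable (Spec_extract_grapevine_traits_py raw_data out) := by unfold Spec_extract_grapevine_traits_py; infer_instance

-- ===== CLAIM (what is proved, stated in full; the proofs are below) =====
def Claim_equal_extract_grapevine_traits_py : Prop := ∀ (raw_data : List (String × List (String × String))), Dom_extract_grapevine_traits_py raw_data → Spec_extract_grapevine_traits_py raw_data (extract_grapevine_traits_py raw_data)

-- ===== LEMMAS AND PROOFS =====

-- proof-side abbreviations
def pvSecItems (d : PySem.Dict String (List (String × String))) (src : String) : List (String × String) :=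
  (PySem.Dict.ofList (d.getD src [])).items
def pvTag (c : String) (l : List (String × String)) : List (String × String × String) :=
  l.map (fun kv => (c, kv.1, kv.2))
def pvDigitsL (l : List (String × String)) : List (String × String) :=
  (l.filter (fun kv => kv.2 != "" && PySem.Str.strIsdigit kv.2)).map (fun kv => (kv.1, pvIntStr kv.2))
def pvAbilPairs (ab : PySem.Dict String String) (keys : List String) : List (String × String) :=
  (keys.filter (fun k => ab.contains k)).map (fun k => (k, ab.getD k ""))

-- A's numeric-section block equals the digit filter of the section's items
theorem numA_eq (d : PySem.Dict String (List (String × String))) (src : String) :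
    (match d.get? src with
      | none => []
      | some sec => (PySem.Dict.ofList sec).items.foldl
          (fun acc kv => if kv.2 != "" && PySem.Str.strIsdigit kv.2 then acc ++ [(kv.1, pvIntStr kv.2)] else acc) [])
    = pvDigitsL (pvSecItems d src) := by
  cases h : d.get? src with
  | none =>
    simp only [pvSecItems, pvDigitsL, PySem.Dict.getD_of_get?_eq_none _ _ h]
    rfl
  | some sec =>
    dsimp only
    rw [PySem.List.foldl_append_if]
    simp only [pvSecItems, pvDigitsL, PySem.Dict.getD_of_get?_eq_some _ _ h, List.nil_append]

-- A's raw-section block equals the truthy filter of the section's items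
theorem rawA_eq (d : PySem.Dict String (List (String × String))) (src : String) :
    (match d.get? src with
      | none => []
      | some sec => (PySem.Dict.ofList sec).items.foldl
          (fun acc kv => if kv.2 != "" then acc ++ [kv] else acc) [])
    = (pvSecItems d src).filter (fun kv => kv.2 != "") := by
  cases h : d.get? src with
  | none =>
    simp only [pvSecItems, PySem.Dict.getD_of_get?_eq_none _ _ h]
    rfl
  | some sec =>
    dsimp only
    rw [PySem.List.foldl_append_if_eq_filter]
    simp only [pvSecItems, PySem.Dict.getD_of_get?_eq_some _ _ h, List.nil_append]

-- A's ability block equals the digit filter of the present-key pairs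
theorem abilA_eq (ab : PySem.Dict String String) (keys : List String) :
    keys.foldl (fun acc k => if ab.contains k && ab.getD k "" != "" && PySem.Str.strIsdigit (ab.getD k "")
        then acc ++ [(k, pvIntStr (ab.getD k ""))] else acc) []
    = pvDigitsL (pvAbilPairs ab keys) := by
  rw [PySem.List.foldl_append_if
    (fun k => ab.contains k && ab.getD k "" != "" && PySem.Str.strIsdigit (ab.getD k ""))
    (fun k => (k, pvIntStr (ab.getD k ""))) keys []]
  simp only [pvDigitsL, pvAbilPairs, List.filter_map, List.map_map, List.filter_filter,
    List.nil_append]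
  congr 1
  apply List.filter_congr
  intro k _
  simp only [Function.comp]
  ac_rfl

-- a dict built from pairs with distinct keys lists exactly those pairs
theorem items_ofList_of_nodup (l : List (String × String)) (h : (l.map (·.1)).Nodup) :
    (PySem.Dict.ofList l).items = l := by
  have := PySem.Dict.items_foldl_insert_fresh (l := l) (k := (·.1)) (v := (·.2))
    (d := PySem.Dict.empty) (by intro a _; simp) (by simpa using h)
  simpa using this

theorem nodup_keys_digitsL (l : List (String × String)) (h : (l.map (·.1)).Nodup) :
    ((pvDigitsL l).map (·.1)).Nodup := by
  simp only [pvDigitsL, List.map_map]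
  have hs : (List.filter (fun kv => kv.2 != "" && PySem.Str.strIsdigit kv.2) l).map
      ((fun p => p.1) ∘ (fun kv : String × String => (kv.1, pvIntStr kv.2)))
      = (List.filter (fun kv => kv.2 != "" && PySem.Str.strIsdigit kv.2) l).map (·.1) := rfl
  rw [hs]
  exact h.sublist (List.Sublist.map _ List.filter_sublist)

theorem nodup_keys_secItems (d : PySem.Dict String (List (String × String))) (src : String) :
    ((pvSecItems d src).map (·.1)).Nodup := PySem.Dict.nodup_keys_ofList _

theorem nodup_keys_abilPairs (ab : PySem.Dict String String) (keys : List String)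
    (h : keys.Nodup) : ((pvAbilPairs ab keys).map (·.1)).Nodup := by
  have hs : (pvAbilPairs ab keys).map (·.1) = keys.filter (fun k => ab.contains k) := by
    simp only [pvAbilPairs, List.map_map]
    exact List.map_congr_left (fun a _ => rfl) |>.trans (List.map_id _)
  rw [hs]
  exact h.sublist List.filter_sublist

-- the stream B builds, segment by segment
def pvStream (d : PySem.Dict String (List (String × String))) (ab : PySem.Dict String String) : List (String × String × String) :=
  pvTag "physical" (pvSecItems d "Physical") ++ pvTag "social" (pvSecItems d "Social") ++
  pvTag "mental" (pvSecItems d "Mental") ++ pvTag "backgrounds" (pvSecItems d "Backgrounds") ++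
  pvTag "disciplines" (pvSecItems d "Disciplines") ++ pvTag "virtues" (pvSecItems d "Virtues") ++
  pvTag "merits" (pvSecItems d "Merits") ++ pvTag "flaws" (pvSecItems d "Flaws") ++
  pvTag "talents" (pvAbilPairs ab pvTalents) ++ pvTag "skills" (pvAbilPairs ab pvSkills) ++
  pvTag "knowledges" (pvAbilPairs ab pvKnowledges)

theorem streamB_eq (d : PySem.Dict String (List (String × String))) (ab : PySem.Dict String String) :
    pvAbilCats.foldl (fun st ck =>
        ck.2.foldl (fun st2 k => if ab.contains k then st2 ++ [(ck.1, k, ab.getD k "")] else st2) st)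
      (pvSectionTags.foldl (fun st sc =>
        (PySem.Dict.ofList (d.getD sc.1 [])).items.foldl
          (fun st2 kv => st2 ++ [(sc.2, kv.1, kv.2)]) st) [])
    = pvStream d ab := by
  simp only [pvSectionTags, pvAbilCats, List.foldl_cons, List.foldl_nil,
    PySem.List.foldl_append_singleton_eq_map, PySem.List.foldl_append_if,
    pvStream, pvTag, pvSecItems, pvAbilPairs, List.map_map, List.append_assoc, List.nil_append]
  rfl

-- specialized forms of filter_tag for the two literal predicates of the port
theorem filter_tag_num (c c' : String) (l : List (String × String)) :
    (pvTag c l).filter (fun t => t.1 == c' && t.2.2 != "" && PySem.Str.strIsdigit t.2.2)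
    = if c = c' then pvTag c (l.filter (fun kv => kv.2 != "" && PySem.Str.strIsdigit kv.2)) else [] := by
  by_cases h : c = c'
  · subst h
    simp only [pvTag, List.filter_map]
    congr 1
    apply List.filter_congr
    intro kv _
    simp [Function.comp]
  · simp [pvTag, List.filter_map, Function.comp, h]

theorem filter_tag_raw (c c' : String) (l : List (String × String)) :
    (pvTag c l).filter (fun t => t.1 == c' && t.2.2 != "")
    = if c = c' then pvTag c (l.filter (fun kv => kv.2 != "")) else [] := by
  by_cases h : c = c'
  · subst h
    simp only [pvTag, List.filter_map]
    congr 1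
    apply List.filter_congr
    intro kv _
    simp [Function.comp]
  · simp [pvTag, List.filter_map, Function.comp, h]

theorem map_num_tag (c : String) (l : List (String × String)) :
    (pvTag c l).map (fun t => (t.2.1, pvIntStr t.2.2)) = l.map (fun kv => (kv.1, pvIntStr kv.2)) := by
  simp only [pvTag, List.map_map]
  rfl

theorem map_raw_tag (c : String) (l : List (String × String)) :
    (pvTag c l).map (fun t => (t.2.1, t.2.2)) = l := by
  simp only [pvTag, List.map_map]
  exact List.map_congr_left (fun a _ => rfl) |>.trans (List.map_id _)

theorem nodup_keys_filter (l : List (String × String)) (p : String × String → Bool)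
    (h : (l.map (·.1)).Nodup) : ((l.filter p).map (·.1)).Nodup :=
  h.sublist (List.Sublist.map _ List.filter_sublist)

-- stage 2 of B: the result dict of the category loop lists one entry per category
theorem items_cats (v : String × Bool → List (String × String)) :
    (pvCategories.foldl (fun res cn => res.insert cn.1 (v cn)) PySem.Dict.empty).items
    = pvCategories.map (fun cn => (cn.1, v cn)) := by
  have := PySem.Dict.items_foldl_insert_fresh (l := pvCategories) (k := (·.1)) (v := v)
    (d := PySem.Dict.empty) (by intro a _; simp) (by decide)
  simpa using this

-- B's numeric selection from the stream, per category
theorem sel_num (d : PySem.Dict String (List (String × String))) (ab : PySem.Dict String String)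
    (c : String) (seg : List (String × String))
    (hsel : ((pvStream d ab).filter (fun t => t.1 == c && t.2.2 != "" && PySem.Str.strIsdigit t.2.2))
      = pvTag c (seg.filter (fun kv => kv.2 != "" && PySem.Str.strIsdigit kv.2)))
    (hnd : (seg.map (·.1)).Nodup) :
    (PySem.Dict.ofList (((pvStream d ab).filter
        (fun t => t.1 == c && t.2.2 != "" && PySem.Str.strIsdigit t.2.2)).map
        (fun t => (t.2.1, pvIntStr t.2.2)))).items = pvDigitsL seg := by
  rw [hsel, map_num_tag]
  exact items_ofList_of_nodup _ (nodup_keys_digitsL _ hnd)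

theorem sel_raw (d : PySem.Dict String (List (String × String))) (ab : PySem.Dict String String)
    (c : String) (seg : List (String × String))
    (hsel : ((pvStream d ab).filter (fun t => t.1 == c && t.2.2 != ""))
      = pvTag c (seg.filter (fun kv => kv.2 != "")))
    (hnd : (seg.map (·.1)).Nodup) :
    (PySem.Dict.ofList (((pvStream d ab).filter
        (fun t => t.1 == c && t.2.2 != "")).map
        (fun t => (t.2.1, t.2.2)))).items = seg.filter (fun kv => kv.2 != "") := by
  rw [hsel, map_raw_tag]
  exact items_ofList_of_nodup _ (nodup_keys_filter _ _ hnd)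

theorem digits_abil_empty (keys : List String) :
    pvDigitsL (pvAbilPairs (PySem.Dict.ofList ([] : List (String × String))) keys) = [] := by
  have h0 : PySem.Dict.ofList ([] : List (String × String)) = PySem.Dict.empty := rfl
  simp [pvAbilPairs, pvDigitsL, h0, PySem.Dict.contains_empty]

theorem sel_physical (d : PySem.Dict String (List (String × String))) (ab : PySem.Dict String String) :
    (PySem.Dict.ofList (((pvStream d ab).filter
        (fun t => t.1 == "physical" && t.2.2 != "" && PySem.Str.strIsdigit t.2.2)).map
        (fun t => (t.2.1, pvIntStr t.2.2)))).items = pvDigitsL (pvSecItems d "Physical") := by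
  refine sel_num d ab _ _ ?_ (nodup_keys_secItems d "Physical")
  simp only [pvStream, List.filter_append, filter_tag_num]
  simp

theorem sel_social (d : PySem.Dict String (List (String × String))) (ab : PySem.Dict String String) :
    (PySem.Dict.ofList (((pvStream d ab).filter
        (fun t => t.1 == "social" && t.2.2 != "" && PySem.Str.strIsdigit t.2.2)).map
        (fun t => (t.2.1, pvIntStr t.2.2)))).items = pvDigitsL (pvSecItems d "Social") := by
  refine sel_num d ab _ _ ?_ (nodup_keys_secItems d "Social")
  simp only [pvStream, List.filter_append, filter_tag_num]
  simp

theorem sel_mental (d : PySem.Dict String (List (String × String))) (ab : PySem.Dict String String) :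
    (PySem.Dict.ofList (((pvStream d ab).filter
        (fun t => t.1 == "mental" && t.2.2 != "" && PySem.Str.strIsdigit t.2.2)).map
        (fun t => (t.2.1, pvIntStr t.2.2)))).items = pvDigitsL (pvSecItems d "Mental") := by
  refine sel_num d ab _ _ ?_ (nodup_keys_secItems d "Mental")
  simp only [pvStream, List.filter_append, filter_tag_num]
  simp

theorem sel_disciplines (d : PySem.Dict String (List (String × String))) (ab : PySem.Dict String String) :
    (PySem.Dict.ofList (((pvStream d ab).filter
        (fun t => t.1 == "disciplines" && t.2.2 != "" && PySem.Str.strIsdigit t.2.2)).map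
        (fun t => (t.2.1, pvIntStr t.2.2)))).items = pvDigitsL (pvSecItems d "Disciplines") := by
  refine sel_num d ab _ _ ?_ (nodup_keys_secItems d "Disciplines")
  simp only [pvStream, List.filter_append, filter_tag_num]
  simp

theorem sel_backgrounds (d : PySem.Dict String (List (String × String))) (ab : PySem.Dict String String) :
    (PySem.Dict.ofList (((pvStream d ab).filter
        (fun t => t.1 == "backgrounds" && t.2.2 != "" && PySem.Str.strIsdigit t.2.2)).map
        (fun t => (t.2.1, pvIntStr t.2.2)))).items = pvDigitsL (pvSecItems d "Backgrounds") := by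
  refine sel_num d ab _ _ ?_ (nodup_keys_secItems d "Backgrounds")
  simp only [pvStream, List.filter_append, filter_tag_num]
  simp

theorem sel_virtues (d : PySem.Dict String (List (String × String))) (ab : PySem.Dict String String) :
    (PySem.Dict.ofList (((pvStream d ab).filter
        (fun t => t.1 == "virtues" && t.2.2 != "" && PySem.Str.strIsdigit t.2.2)).map
        (fun t => (t.2.1, pvIntStr t.2.2)))).items = pvDigitsL (pvSecItems d "Virtues") := by
  refine sel_num d ab _ _ ?_ (nodup_keys_secItems d "Virtues")
  simp only [pvStream, List.filter_append, filter_tag_num]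
  simp

theorem sel_talents (d : PySem.Dict String (List (String × String))) (ab : PySem.Dict String String) :
    (PySem.Dict.ofList (((pvStream d ab).filter
        (fun t => t.1 == "talents" && t.2.2 != "" && PySem.Str.strIsdigit t.2.2)).map
        (fun t => (t.2.1, pvIntStr t.2.2)))).items = pvDigitsL (pvAbilPairs ab pvTalents) := by
  refine sel_num d ab _ _ ?_ (nodup_keys_abilPairs ab pvTalents (by decide))
  simp only [pvStream, List.filter_append, filter_tag_num]
  simp

theorem sel_skills (d : PySem.Dict String (List (String × String))) (ab : PySem.Dict String String) :
    (PySem.Dict.ofList (((pvStream d ab).filter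
        (fun t => t.1 == "skills" && t.2.2 != "" && PySem.Str.strIsdigit t.2.2)).map
        (fun t => (t.2.1, pvIntStr t.2.2)))).items = pvDigitsL (pvAbilPairs ab pvSkills) := by
  refine sel_num d ab _ _ ?_ (nodup_keys_abilPairs ab pvSkills (by decide))
  simp only [pvStream, List.filter_append, filter_tag_num]
  simp

theorem sel_knowledges (d : PySem.Dict String (List (String × String))) (ab : PySem.Dict String String) :
    (PySem.Dict.ofList (((pvStream d ab).filter
        (fun t => t.1 == "knowledges" && t.2.2 != "" && PySem.Str.strIsdigit t.2.2)).map
        (fun t => (t.2.1, pvIntStr t.2.2)))).items = pvDigitsL (pvAbilPairs ab pvKnowledges) := by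
  refine sel_num d ab _ _ ?_ (nodup_keys_abilPairs ab pvKnowledges (by decide))
  simp only [pvStream, List.filter_append, filter_tag_num]
  simp

theorem sel_merits (d : PySem.Dict String (List (String × String))) (ab : PySem.Dict String String) :
    (PySem.Dict.ofList (((pvStream d ab).filter
        (fun t => t.1 == "merits" && t.2.2 != "")).map
        (fun t => (t.2.1, t.2.2)))).items = (pvSecItems d "Merits").filter (fun kv => kv.2 != "") := by
  refine sel_raw d ab _ _ ?_ (nodup_keys_secItems d "Merits")
  simp only [pvStream, List.filter_append, filter_tag_raw]
  simp

theorem sel_flaws (d : PySem.Dict String (List (String × String))) (ab : PySem.Dict String String) :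
    (PySem.Dict.ofList (((pvStream d ab).filter
        (fun t => t.1 == "flaws" && t.2.2 != "")).map
        (fun t => (t.2.1, t.2.2)))).items = (pvSecItems d "Flaws").filter (fun kv => kv.2 != "") := by
  refine sel_raw d ab _ _ ?_ (nodup_keys_secItems d "Flaws")
  simp only [pvStream, List.filter_append, filter_tag_raw]
  simp

-- ===== VERDICT (by name: the statement is the Claim_ definition above) =====
theorem extract_grapevine_traits_py_spec : Claim_equal_extract_grapevine_traits_py := by
  intro raw_data _
  show extract_grapevine_traits_py raw_data = extract_grapevine_traits_py_alt raw_data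
  unfold extract_grapevine_traits_py extract_grapevine_traits_py_alt
  simp only [numA_eq, rawA_eq, streamB_eq, items_cats]
  cases h : (PySem.Dict.ofList raw_data).get? "Abilities" with
  | none =>
    simp only [PySem.Dict.getD_of_get?_eq_none _ _ h, pvCategories, List.map_cons, List.map_nil,
      sel_physical, sel_social, sel_mental, sel_talents, sel_skills, sel_knowledges,
      sel_disciplines, sel_backgrounds, sel_virtues, sel_merits, sel_flaws, digits_abil_empty]
    simp
  | some ab' =>
    simp only [PySem.Dict.getD_of_get?_eq_some _ _ h, abilA_eq, pvCategories, List.map_cons, List.map_nil,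
      sel_physical, sel_social, sel_mental, sel_talents, sel_skills, sel_knowledges,
      sel_disciplines, sel_backgrounds, sel_virtues, sel_merits, sel_flaws]
    simp [pvTalents, pvSkills, pvKnowledges]
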